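-- pv_equiv track=rewrite | github.com/mblazhko/transcripting-dialogue | main.py | split_dialogue
-- ===== SOURCE A (Python) =====
-- def split_dialogue(dialogue: str, max_length: int) -> list[str]:
--     block = ""
--     blocks = []
--     for char in dialogue:
--         block += char
--         if len(block) >= max_length and char == ".":
--             blocks.append(block)
--             block = ""
--     if block:
--         blocks.append(block)
--
--     return blocks
-- ===== SOURCE B (Python) =====
-- def split_dialogue(dialogue: str, max_length: int) -> list[str]:
--     n = len(dialogue)
--     periods = [i for i, c in enumerate(dialogue) if c == "."]
--     blocks = []
--     start = 0
--     for p in periods: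
--         if p - start + 1 >= max_length:
--             blocks.append(dialogue[start:p + 1])
--             start = p + 1
--     if start < n:
--         blocks.append(dialogue[start:])
--     return blocks
-- ===== Notes on version B (the rewrite author's own statement) =====
-- stated objective: alternative
-- what changed: Replaces A's per-character accumulate-and-flush loop with a pass that first collects all period indices and then iterates only over those, cutting blocks out of the string by slicing with a start cursor.
import Mathlib
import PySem

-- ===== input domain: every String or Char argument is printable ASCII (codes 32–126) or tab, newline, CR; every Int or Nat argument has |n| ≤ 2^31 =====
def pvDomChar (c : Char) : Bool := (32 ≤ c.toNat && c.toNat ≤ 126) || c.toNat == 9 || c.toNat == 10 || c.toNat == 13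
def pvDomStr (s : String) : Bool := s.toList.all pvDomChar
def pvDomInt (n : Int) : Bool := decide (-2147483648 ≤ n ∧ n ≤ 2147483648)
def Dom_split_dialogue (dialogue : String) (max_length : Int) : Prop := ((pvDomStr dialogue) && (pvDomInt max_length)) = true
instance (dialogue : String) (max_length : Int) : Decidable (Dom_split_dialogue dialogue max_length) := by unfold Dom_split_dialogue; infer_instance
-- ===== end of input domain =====

-- B replaces A's per-character accumulate-and-flush with one pass over the period positions
-- plus slicing (objective: alternative decomposition; same asymptotic cost).

-- ===== PORT A =====
-- one iteration of A's for-loop: state = (blocks so far, current block)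
def aStep (m : Int) (st : List (List Char) × List Char) (c : Char) :
    List (List Char) × List Char :=
  let block := st.2 ++ [c]
  if m ≤ (block.length : Int) ∧ c = '.' then (st.1 ++ [block], []) else (st.1, block)

-- `if block: blocks.append(block)` after the loop
def aFinish (st : List (List Char) × List Char) : List (List Char) :=
  if st.2 = [] then st.1 else st.1 ++ [st.2]

def split_dialogue (dialogue : String) (max_length : Int) : List String :=
  (aFinish (dialogue.toList.foldl (aStep max_length) ([], []))).map String.mk

-- ===== PORT B =====
-- [i for i, c in enumerate(dialogue) if c == "."], enumerating from k
def periodsFrom (k : Int) (cs : List Char) : List Int :=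
  (PySem.List.enumerate cs k).filterMap (fun ic => if ic.2 = '.' then some ic.1 else none)

-- one iteration of B's for-loop over the period positions: state = (start, blocks)
def bStep (s : List Char) (m : Int) (st : Int × List (List Char)) (p : Int) :
    Int × List (List Char) :=
  if m ≤ p - st.1 + 1 then
    (p + 1, st.2 ++ [PySem.List.slice s (some st.1) (some (p + 1))])
  else st

-- `if start < n: blocks.append(dialogue[start:])` after the loop
def bFinish (s : List Char) (st : Int × List (List Char)) : List (List Char) :=
  if st.1 < (s.length : Int) then st.2 ++ [PySem.List.slice s (some st.1) none] else st.2

def split_dialogue_alt (dialogue : String) (max_length : Int) : List String :=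
  (bFinish dialogue.toList
    ((periodsFrom 0 dialogue.toList).foldl (bStep dialogue.toList max_length) (0, []))).map String.mk

-- ===== PRECONDITION & SPEC =====
def Spec_split_dialogue (dialogue : String) (max_length : Int) (out : List String) : Prop := out = split_dialogue_alt dialogue max_length
instance (dialogue : String) (max_length : Int) (out : List String) : Decidable (Spec_split_dialogue dialogue max_length out) := by unfold Spec_split_dialogue; infer_instance

-- ===== CLAIM (what is proved, stated in full; the proofs are below) =====
def Claim_equal_split_dialogue : Prop := ∀ (dialogue : String) (max_length : Int), Dom_split_dialogue dialogue max_length → Spec_split_dialogue dialogue max_length (split_dialogue dialogue max_length)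

-- ===== LEMMAS AND PROOFS =====

-- common reference: the blocks produced from remaining characters cs with pending block b
def brel (m : Int) : List Char → List Char → List (List Char)
  | [], b => if b = [] then [] else [b]
  | c :: cs, b =>
    if m ≤ (b.length : Int) + 1 ∧ c = '.' then (b ++ [c]) :: brel m cs []
    else brel m cs (b ++ [c])

lemma aLoop_eq_brel (m : Int) : ∀ (cs : List Char) (acc : List (List Char)) (b : List Char),
    aFinish (cs.foldl (aStep m) (acc, b)) = acc ++ brel m cs b := by
  intro cs
  induction cs with
  | nil =>
    intro acc b
    by_cases hb : b = [] <;> simp [aFinish, brel, hb]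
  | cons c cs ih =>
    intro acc b
    rw [List.foldl_cons]
    by_cases hc : c = '.'
    · subst hc
      by_cases hm : m ≤ (b.length : Int) + 1
      · have hstep : aStep m (acc, b) '.' = (acc ++ [b ++ ['.']], []) := by
          simp [aStep, hm]
        rw [hstep, ih]
        simp [brel, hm]
      · have hstep : aStep m (acc, b) '.' = (acc, b ++ ['.']) := by
          simp [aStep, hm]
        rw [hstep, ih]
        simp [brel, hm]
    · have hstep : aStep m (acc, b) c = (acc, b ++ [c]) := by
        simp [aStep, hc]
      rw [hstep, ih]
      simp [brel, hc]

lemma periodsFrom_cons_dot (k : Int) (cs : List Char) :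
    periodsFrom k ('.' :: cs) = k :: periodsFrom (k + 1) cs := by
  simp [periodsFrom, PySem.List.enumerate_cons]

lemma periodsFrom_cons_ne {c : Char} (hc : ¬ c = '.') (k : Int) (cs : List Char) :
    periodsFrom k (c :: cs) = periodsFrom (k + 1) cs := by
  simp [periodsFrom, PySem.List.enumerate_cons, hc]

lemma bStep_pos (s : List Char) (m st1 : Int) (st2 : List (List Char)) (p : Int)
    (h : m ≤ p - st1 + 1) :
    bStep s m (st1, st2) p = (p + 1, st2 ++ [PySem.List.slice s (some st1) (some (p + 1))]) := by
  simp [bStep, h]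

lemma bStep_neg (s : List Char) (m st1 : Int) (st2 : List (List Char)) (p : Int)
    (h : ¬ m ≤ p - st1 + 1) :
    bStep s m (st1, st2) p = (st1, st2) := by
  simp [bStep, h]

lemma bLoop_eq_brel (m : Int) : ∀ (cs pre b : List Char) (acc : List (List Char)),
    bFinish (pre ++ b ++ cs)
      ((periodsFrom ((pre.length : Int) + (b.length : Int)) cs).foldl
        (bStep (pre ++ b ++ cs) m) ((pre.length : Int), acc))
    = acc ++ brel m cs b := by
  intro cs
  induction cs with
  | nil =>
    intro pre b acc
    simp only [periodsFrom, PySem.List.enumerate_nil, List.filterMap_nil, List.foldl_nil,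
      List.append_nil, brel]
    by_cases hb : b = []
    · subst hb
      simp [bFinish]
    · have h1 : ((pre.length : Int)) < (((pre ++ b).length : Nat) : Int) := by
        have := List.length_pos_iff.mpr hb
        push_cast [List.length_append]; omega
      unfold bFinish
      rw [if_pos h1, if_neg hb, PySem.List.slice_from_natCast]
      simp
  | cons c cs ih =>
    intro pre b acc
    by_cases hc : c = '.'
    · subst hc
      rw [periodsFrom_cons_dot, List.foldl_cons]
      by_cases hm : m ≤ (b.length : Int) + 1
      · -- flush: the block b ++ ['.'] is emitted and start moves past the period
        have hcond : m ≤ ((pre.length : Int) + (b.length : Int)) - (pre.length : Int) + 1 := by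
          omega
        rw [bStep_pos _ _ _ _ _ hcond]
        have hslice : PySem.List.slice (pre ++ b ++ '.' :: cs)
            (some ((pre.length : Int)))
            (some ((pre.length : Int) + (b.length : Int) + 1)) = b ++ ['.'] := by
          have h1 : ((pre.length : Int) + (b.length : Int) + 1)
              = (((pre.length + b.length + 1 : Nat)) : Int) := by push_cast; ring
          rw [h1, PySem.List.slice_natCast]
          have h2 : (pre ++ b ++ '.' :: cs).drop pre.length = b ++ '.' :: cs := by
            rw [List.append_assoc]
            exact List.drop_left
          have h3 : pre.length + b.length + 1 - pre.length = b.length + 1 := by omega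
          rw [h2, h3, show b ++ '.' :: cs = (b ++ ['.']) ++ cs by simp]
          exact List.take_left' (by simp)
        rw [hslice]
        have := ih (pre ++ b ++ ['.']) [] (acc ++ [b ++ ['.']])
        simp only [List.append_nil, List.length_nil, Nat.cast_zero, add_zero] at this
        have harr : pre ++ b ++ ['.'] ++ cs = pre ++ b ++ '.' :: cs := by simp
        have hlen2 : (((pre ++ b ++ ['.']).length : Nat) : Int)
            = (pre.length : Int) + (b.length : Int) + 1 := by
          push_cast [List.length_append, List.length_cons, List.length_nil]; ring
        rw [harr, hlen2] at this
        rw [show ((pre.length : Int) + (b.length : Int)) + 1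
              = (pre.length : Int) + (b.length : Int) + 1 by ring]
        rw [this]
        simp [brel, hm]
      · -- too short: the period is skipped, state unchanged
        have hcond : ¬ m ≤ ((pre.length : Int) + (b.length : Int)) - (pre.length : Int) + 1 := by
          omega
        rw [bStep_neg _ _ _ _ _ hcond]
        have := ih pre (b ++ ['.']) acc
        have hk : (pre.length : Int) + (((b ++ ['.']).length : Nat) : Int)
            = (pre.length : Int) + (b.length : Int) + 1 := by
          push_cast [List.length_append, List.length_cons, List.length_nil]; ring
        have harr : pre ++ (b ++ ['.']) ++ cs = pre ++ b ++ '.' :: cs := by simp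
        rw [hk, harr] at this
        rw [this]
        simp [brel, hm]
    · rw [periodsFrom_cons_ne hc]
      have := ih pre (b ++ [c]) acc
      have hk : (pre.length : Int) + (((b ++ [c]).length : Nat) : Int)
          = (pre.length : Int) + (b.length : Int) + 1 := by
        push_cast [List.length_append, List.length_cons, List.length_nil]; ring
      have harr : pre ++ (b ++ [c]) ++ cs = pre ++ b ++ c :: cs := by simp
      rw [hk, harr] at this
      rw [this]
      simp [brel, hc]

-- ===== VERDICT (by name: the statement is the Claim_ definition above) =====
theorem split_dialogue_spec : Claim_equal_split_dialogue := by
  intro dialogue max_length _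
  unfold Spec_split_dialogue split_dialogue split_dialogue_alt
  have hA := aLoop_eq_brel max_length dialogue.toList [] []
  have hB := bLoop_eq_brel max_length dialogue.toList [] [] []
  simp only [List.nil_append, List.length_nil, Nat.cast_zero, add_zero] at hB
  rw [hA, ← hB]
  simp
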